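-- pv_equiv track=rewrite | github.com/deeev-sb/til-2022.02 | Algorithm/Python_Algorithm/solve/section_4/solution_10.py | solution
-- ===== SOURCE A (Python) =====
-- def solution(n, nums):
--     answer = ''
--     temp = [0]*n
--     for i in range(n):
--         for j in range(n):
--             if nums[i]==0 and temp[j]==0:
--                 temp[j]=i+1
--                 break
--             elif nums[i]!=0 and temp[j]==0:
--                 nums[i]-=1
--     for i in temp:
--         answer += str(i) + ' '
--     return answer
-- ===== SOURCE B (Python) =====
-- def solution(n, nums):
--     # Keep an ordered list of still-empty slot indices; for each value i,
--     # pop the nums[i]-th remaining empty slot directly instead of rescanning temp.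
--     temp = [0] * n
--     empties = list(range(n))
--     for i, k in enumerate(nums[:n]):
--         if 0 <= k < len(empties):
--             temp[empties.pop(k)] = i + 1
--     return ''.join(str(t) + ' ' for t in temp)
-- ===== Notes on version B (the rewrite author's own statement) =====
-- stated objective: alternative
-- what changed: Instead of rescanning all n slots per value while counting down nums[i], B keeps an ordered list of still-empty slot indices and pops the nums[i]-th one directly (one list.pop per value).
import Mathlib
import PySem

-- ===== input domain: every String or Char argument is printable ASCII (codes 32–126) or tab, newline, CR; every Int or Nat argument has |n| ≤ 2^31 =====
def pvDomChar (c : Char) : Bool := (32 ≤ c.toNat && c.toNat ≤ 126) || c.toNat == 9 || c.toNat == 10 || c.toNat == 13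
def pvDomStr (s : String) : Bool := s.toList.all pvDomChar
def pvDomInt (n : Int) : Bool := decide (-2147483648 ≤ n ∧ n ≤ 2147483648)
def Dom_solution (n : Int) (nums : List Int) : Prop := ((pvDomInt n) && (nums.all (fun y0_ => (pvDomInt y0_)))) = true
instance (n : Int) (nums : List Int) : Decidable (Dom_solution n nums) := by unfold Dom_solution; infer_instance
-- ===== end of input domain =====

-- B keeps an ordered list of the still-empty slot indices and pops the k-th one directly,
-- instead of A's counted inner scan over all n slots per value (alternative decomposition).
-- A decrements nums[i] in place (a caller-visible mutation B does not perform); the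
-- equivalence proved here is about the RETURN value only.

-- ===== PORT A =====
-- A's inner 'for j in range(n)' loop: scan temp; k is the running value of nums[i]
def solInner (v : Int) (k : Int) (temp : List Int) : List Int × Int :=
  match temp with
  | [] => ([], k)
  | t :: rest =>
    if k = 0 ∧ t = 0 then (v :: rest, k)          -- temp[j] = i+1; break
    else if k ≠ 0 ∧ t = 0 then
      let r := solInner v (k - 1) rest            -- nums[i] -= 1
      (t :: r.1, r.2)
    else
      let r := solInner v k rest
      (t :: r.1, r.2)

def solution (n : Int) (nums : List Int) : String :=
  let st := (PySem.List.pyRange 0 n 1).foldl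
    (fun st i =>
      let k := PySem.List.pyGetD st.2 i 0         -- nums[i] (in range under Pre_)
      let r := solInner (i + 1) k st.1
      (r.1, st.2.set i.toNat r.2))                -- write the decremented nums[i] back
    (List.replicate n.toNat 0, nums)
  st.1.foldl (fun a t => a ++ PySem.Int.toStr t ++ " ") ""

-- ===== PORT B =====
-- one step of B's loop: p = (i, k); if 0 <= k < len(empties), pop the k-th empty slot and fill it
def solStep (st : List Int × List Int) (p : Int × Int) : List Int × List Int :=
  if 0 ≤ p.2 ∧ p.2 < (st.2.length : Int) then
    match PySem.List.pop? st.2 p.2 with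
    | some r => (st.1.set r.1.toNat (p.1 + 1), r.2)
    | none => st
  else st

def solution_alt (n : Int) (nums : List Int) : String :=
  let temp := List.replicate n.toNat 0
  let empties := PySem.List.pyRange 0 n 1
  let st := (PySem.List.enumerate (PySem.List.slice nums none (some n))).foldl solStep (temp, empties)
  PySem.Str.join "" (st.1.map (fun t => PySem.Int.toStr t ++ " "))

-- ===== PRECONDITION & SPEC =====
-- Pre_ excludes exactly the inputs where A raises IndexError: n > len(nums)
def Pre_solution (n : Int) (nums : List Int) : Prop := n ≤ (nums.length : Int)
instance (n : Int) (nums : List Int) : Decidable (Pre_solution n nums) := by unfold Pre_solution; infer_instance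
def pvWitness_solution : Int × List Int := (3, [0, 1, 0])

def Spec_solution (n : Int) (nums : List Int) (out : String) : Prop := out = solution_alt n nums
instance (n : Int) (nums : List Int) (out : String) : Decidable (Spec_solution n nums out) := by unfold Spec_solution; infer_instance

-- ===== CLAIM (what is proved, stated in full; the proofs are below) =====
def Claim_equal_solution : Prop := ∀ (n : Int) (nums : List Int), Dom_solution n nums → Pre_solution n nums → Spec_solution n nums (solution n nums)

-- ===== LEMMAS AND PROOFS =====

-- indices of the still-empty (zero) slots of temp, in increasing order
def solZeros : List Int → List Nat
  | [] => []
  | t :: r => if t = 0 then 0 :: (solZeros r).map (· + 1) else (solZeros r).map (· + 1)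

theorem solInner_spec (v : Int) : ∀ (temp : List Int) (k : Int),
    solInner v k temp =
      if 0 ≤ k ∧ k.toNat < (solZeros temp).length
      then (temp.set ((solZeros temp).getD k.toNat 0) v, 0)
      else (temp, k - (solZeros temp).length) := by
  intro temp
  induction temp with
  | nil => intro k; simp [solInner, solZeros]
  | cons t rest ih =>
    intro k
    by_cases ht : t = 0
    · subst ht
      have hz : solZeros (0 :: rest) = 0 :: (solZeros rest).map (· + 1) := by
        simp [solZeros]
      by_cases hk : k = 0
      · subst hk
        rw [hz]
        simp [solInner]
      · have h1 : solInner v k (0 :: rest) =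
            ((0 :: (solInner v (k-1) rest).1), (solInner v (k-1) rest).2) := by
          simp [solInner, hk]
        rw [h1, ih (k - 1), hz]
        by_cases hc : 0 ≤ k - 1 ∧ (k - 1).toNat < (solZeros rest).length
        · rw [if_pos hc]
          have hc' : 0 ≤ k ∧ k.toNat < (0 :: (solZeros rest).map (· + 1)).length := by
            simp; omega
          rw [if_pos hc']
          have hkt : k.toNat = (k - 1).toNat + 1 := by omega
          have hgd : ((solZeros rest).map (· + 1)).getD (k - 1).toNat 0
              = (solZeros rest).getD (k - 1).toNat 0 + 1 := by
            rcases hc with ⟨-, hlt⟩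
            rw [List.getD_eq_getElem _ _ (by simpa using hlt),
                List.getD_eq_getElem _ _ hlt, List.getElem_map]
          rw [hkt, List.getD_cons_succ, hgd, List.set_cons_succ]
        · rw [if_neg hc]
          have hc' : ¬ (0 ≤ k ∧ k.toNat < (0 :: (solZeros rest).map (· + 1)).length) := by
            simp; omega
          rw [if_neg hc']
          simp; omega
    · have hz : solZeros (t :: rest) = (solZeros rest).map (· + 1) := by
        simp [solZeros, ht]
      have h1 : solInner v k (t :: rest) =
          ((t :: (solInner v k rest).1), (solInner v k rest).2) := by
        simp [solInner, ht]
      rw [h1, ih k, hz]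
      by_cases hc : 0 ≤ k ∧ k.toNat < (solZeros rest).length
      · have hc' : 0 ≤ k ∧ k.toNat < ((solZeros rest).map (· + 1)).length := by simpa using hc
        rw [if_pos hc, if_pos hc']
        have hgd : ((solZeros rest).map (· + 1)).getD k.toNat 0
            = (solZeros rest).getD k.toNat 0 + 1 := by
          rcases hc with ⟨-, hlt⟩
          rw [List.getD_eq_getElem _ _ (by simpa using hlt),
              List.getD_eq_getElem _ _ hlt, List.getElem_map]
        rw [hgd, List.set_cons_succ]
      · have hc' : ¬ (0 ≤ k ∧ k.toNat < ((solZeros rest).map (· + 1)).length) := by simpa using hc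
        rw [if_neg hc, if_neg hc']
        simp

theorem eraseIdx_map_gen {α β : Type} (f : α → β) : ∀ (l : List α) (m : Nat),
    (l.map f).eraseIdx m = (l.eraseIdx m).map f := by
  intro l
  induction l with
  | nil => intro m; simp
  | cons a l ih =>
    intro m
    cases m with
    | zero => simp
    | succ m' => simp [List.eraseIdx_cons_succ, ih m']

theorem getD_map_succ (l : List Nat) (m : Nat) (hm : m < l.length) :
    (l.map (· + 1)).getD m 0 = l.getD m 0 + 1 := by
  rw [List.getD_eq_getElem _ _ (by simpa using hm), List.getD_eq_getElem _ _ hm, List.getElem_map]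

theorem solZeros_set : ∀ (temp : List Int) (m : Nat) (v : Int), v ≠ 0 →
    m < (solZeros temp).length →
    solZeros (temp.set ((solZeros temp).getD m 0) v) = (solZeros temp).eraseIdx m := by
  intro temp
  induction temp with
  | nil => intro m v _ hm; simp [solZeros] at hm
  | cons t rest ih =>
    intro m v hv hm
    by_cases ht : t = 0
    · subst ht
      have hz : solZeros (0 :: rest) = 0 :: (solZeros rest).map (· + 1) := by
        simp [solZeros]
      rw [hz] at hm ⊢
      cases m with
      | zero =>
        simp [solZeros, hv]
      | succ m' =>
        have hm' : m' < (solZeros rest).length := by simpa using hm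
        rw [List.getD_cons_succ, getD_map_succ _ _ hm', List.set_cons_succ,
            List.eraseIdx_cons_succ]
        have h2 : solZeros (0 :: rest.set ((solZeros rest).getD m' 0) v)
            = 0 :: (solZeros (rest.set ((solZeros rest).getD m' 0) v)).map (· + 1) := by
          simp [solZeros]
        rw [h2, ih m' v hv hm', eraseIdx_map_gen]
    · have hz : solZeros (t :: rest) = (solZeros rest).map (· + 1) := by
        simp [solZeros, ht]
      rw [hz] at hm ⊢
      have hm' : m < (solZeros rest).length := by simpa using hm
      rw [getD_map_succ _ _ hm', List.set_cons_succ]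
      have h2 : solZeros (t :: rest.set ((solZeros rest).getD m 0) v)
          = (solZeros (rest.set ((solZeros rest).getD m 0) v)).map (· + 1) := by
        simp [solZeros, ht]
      rw [h2, ih m v hv hm', eraseIdx_map_gen]

theorem solStep_eq (temp : List Int) (p : Int × Int) (hi : 0 ≤ p.1) :
    solStep (temp, (solZeros temp).map (fun j : Nat => (j : Int))) p
      = ((solInner (p.1 + 1) p.2 temp).1,
         (solZeros (solInner (p.1 + 1) p.2 temp).1).map (fun j : Nat => (j : Int))) := by
  by_cases hc : 0 ≤ p.2 ∧ p.2 < (((solZeros temp).map (fun j : Nat => (j : Int))).length : Int)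
  · have hk0 : 0 ≤ p.2 := hc.1
    have hlen : p.2.toNat < (solZeros temp).length := by
      have := hc.2; simp at this; omega
    have hlen' : p.2.toNat < ((solZeros temp).map (fun j : Nat => (j : Int))).length := by
      simpa using hlen
    have hpop : PySem.List.pop? ((solZeros temp).map (fun j : Nat => (j : Int))) p.2
        = some ((((solZeros temp).map (fun j : Nat => (j : Int)))[p.2.toNat]'hlen'),
            ((solZeros temp).map (fun j : Nat => (j : Int))).eraseIdx p.2.toNat) := by
      have h := PySem.List.pop?_natCast ((solZeros temp).map (fun j : Nat => (j : Int)))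
        p.2.toNat hlen'
      rw [Int.toNat_of_nonneg hk0] at h
      exact h
    simp only [solStep, if_pos hc, hpop]
    have hel : (((solZeros temp).map (fun j : Nat => (j : Int)))[p.2.toNat]'hlen')
        = (((solZeros temp)[p.2.toNat]'hlen : Nat) : Int) := by
      simp
    rw [solInner_spec, if_pos ⟨hk0, hlen⟩]
    have hv : p.1 + 1 ≠ 0 := by omega
    have hgd : (solZeros temp).getD p.2.toNat 0 = (solZeros temp)[p.2.toNat]'hlen := by
      rw [List.getD_eq_getElem _ _ hlen]
    simp only [Prod.mk.injEq]
    refine ⟨?_, ?_⟩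
    · rw [hel, Int.toNat_natCast, hgd]
    · rw [eraseIdx_map_gen]
      have := solZeros_set temp p.2.toNat (p.1 + 1) hv hlen
      rw [hgd] at this
      rw [← this, hgd]
  · simp only [solStep, if_neg hc]
    have hc' : ¬ (0 ≤ p.2 ∧ p.2.toNat < (solZeros temp).length) := by
      simp at hc ⊢; intro h0; have := hc h0; omega
    rw [solInner_spec, if_neg hc']

theorem solFoldB : ∀ (ps : List (Int × Int)) (temp : List Int),
    (∀ p ∈ ps, 0 ≤ p.1) →
    (ps.foldl solStep (temp, (solZeros temp).map (fun j : Nat => (j : Int)))).1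
      = ps.foldl (fun t p => (solInner (p.1 + 1) p.2 t).1) temp := by
  intro ps
  induction ps with
  | nil => intro temp _; rfl
  | cons p ps ih =>
    intro temp h
    rw [List.foldl_cons, List.foldl_cons, solStep_eq temp p (h p (by simp))]
    exact ih _ (fun q hq => h q (by simp [hq]))

theorem solFoldA (nums0 : List Int) : ∀ (c m : Nat) (temp numsS : List Int),
    (∀ j : Nat, m ≤ j → numsS[j]? = nums0[j]?) →
    ((List.range' m c).foldl (fun st (j : Nat) =>
        ((solInner ((j : Int) + 1) (PySem.List.pyGetD st.2 (j : Int) 0) st.1).1,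
         st.2.set ((j : Int)).toNat
           (solInner ((j : Int) + 1) (PySem.List.pyGetD st.2 (j : Int) 0) st.1).2))
      (temp, numsS)).1
    = (List.range' m c).foldl (fun t (j : Nat) => (solInner ((j : Int) + 1) (nums0.getD j 0) t).1) temp := by
  intro c
  induction c with
  | zero => intro m temp numsS _; rfl
  | succ c ih =>
    intro m temp numsS h
    rw [List.range'_succ, List.foldl_cons, List.foldl_cons]
    have hget : PySem.List.pyGetD numsS (m : Int) 0 = nums0.getD m 0 := by
      rw [PySem.List.pyGetD_natCast, List.getD_eq_getElem?_getD, List.getD_eq_getElem?_getD,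
          h m (le_refl m)]
    rw [hget, Int.toNat_natCast]
    exact ih (m + 1) _ _ (fun j hj => by
      rw [List.getElem?_set_ne (by omega)]
      exact h j (by omega))

theorem solZeros_replicate : ∀ (c : Nat), solZeros (List.replicate c 0) = List.range c := by
  intro c
  induction c with
  | zero => simp [solZeros]
  | succ c ih =>
    rw [List.replicate_succ]
    show solZeros (0 :: List.replicate c 0) = _
    simp [solZeros, ih, List.range_succ_eq_map]

theorem charsJoinNil_cons (c : List Char) (xs : List (List Char)) :
    PySem.Chars.join [] (c :: xs) = c ++ PySem.Chars.join [] xs := by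
  cases xs with
  | nil => simp [PySem.Chars.join_singleton, PySem.Chars.join_nil]
  | cons b r => simp [PySem.Chars.join_cons_cons]

theorem strJoinNil_cons (x : String) (xs : List String) :
    PySem.Str.join "" (x :: xs) = x ++ PySem.Str.join "" xs := by
  simp [PySem.Str.join, charsJoinNil_cons]

theorem foldl_toStr_join (l : List Int) (a : String) :
    l.foldl (fun a t => a ++ PySem.Int.toStr t ++ " ") a
      = a ++ PySem.Str.join "" (l.map (fun t => PySem.Int.toStr t ++ " ")) := by
  induction l generalizing a with
  | nil => simp [PySem.Str.join, PySem.Chars.join_nil]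
  | cons t r ih =>
    rw [List.foldl_cons, ih, List.map_cons, strJoinNil_cons]
    simp [String.append_assoc]

theorem foldB_nil (ps : List (Int × Int)) :
    ps.foldl (fun t p => (solInner (p.1 + 1) p.2 t).1) ([] : List Int) = [] := by
  induction ps with
  | nil => rfl
  | cons p ps ih => simpa [solInner] using ih

-- ===== VERDICT (by name: the statement is the Claim_ definition above) =====
theorem pyRange_cast (c : Nat) :
    PySem.List.pyRange 0 (c : Int) 1 = (List.range c).map (fun j : Nat => (j : Int)) := by
  rw [PySem.List.pyRange_one]
  simp

theorem solution_spec : Claim_equal_solution := by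
  intro n nums _ hpre
  unfold Pre_solution at hpre
  show solution n nums = solution_alt n nums
  show ((PySem.List.pyRange 0 n 1).foldl
      (fun st i =>
        let k := PySem.List.pyGetD st.2 i 0
        let r := solInner (i + 1) k st.1
        (r.1, st.2.set i.toNat r.2))
      (List.replicate n.toNat 0, nums)).1.foldl (fun a t => a ++ PySem.Int.toStr t ++ " ") ""
    = PySem.Str.join "" (((PySem.List.enumerate (PySem.List.slice nums none (some n))).foldl
        solStep (List.replicate n.toNat 0, PySem.List.pyRange 0 n 1)).1.map
          (fun t => PySem.Int.toStr t ++ " "))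
  have hmem : ∀ p ∈ PySem.List.enumerate (PySem.List.slice nums none (some n)) 0, 0 ≤ p.1 := by
    intro p hp
    rcases (PySem.List.mem_enumerate_iff _ _ _).mp hp with ⟨k, hk, rfl⟩
    simp
  by_cases hn : 0 ≤ n
  · -- main case
    have hlen : n.toNat ≤ nums.length := by omega
    have hA1 : PySem.List.pyRange 0 n 1 = (List.range n.toNat).map (fun j : Nat => (j : Int)) := by
      rw [show n = ((n.toNat : Nat) : Int) by omega]
      exact pyRange_cast n.toNat
    have hAfst : ((PySem.List.pyRange 0 n 1).foldl
        (fun st i =>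
          let k := PySem.List.pyGetD st.2 i 0
          let r := solInner (i + 1) k st.1
          (r.1, st.2.set i.toNat r.2))
        (List.replicate n.toNat 0, nums)).1
      = (List.range n.toNat).foldl
          (fun t (j : Nat) => (solInner ((j : Int) + 1) (nums.getD j 0) t).1)
          (List.replicate n.toNat 0) := by
      rw [hA1, List.foldl_map, List.range_eq_range']
      exact solFoldA nums n.toNat 0 _ nums (fun j _ => rfl)
    have hsl : PySem.List.slice nums none (some n) = nums.take n.toNat :=
      PySem.List.slice_to nums hn
    have htl : (nums.take n.toNat).length = n.toNat := by
      simp [hlen]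
    have hemp : PySem.List.pyRange 0 n 1
        = (solZeros (List.replicate n.toNat 0)).map (fun j : Nat => (j : Int)) := by
      rw [solZeros_replicate, hA1]
    have hBfst : ((PySem.List.enumerate (PySem.List.slice nums none (some n))).foldl
        solStep (List.replicate n.toNat 0, PySem.List.pyRange 0 n 1)).1
      = (List.range n.toNat).foldl
          (fun t (j : Nat) => (solInner ((j : Int) + 1) (nums.getD j 0) t).1)
          (List.replicate n.toNat 0) := by
      rw [hemp, solFoldB _ _ hmem, hsl]
      rw [PySem.List.enumerate_eq_map_pyRange (List.take n.toNat nums) 0]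
      have hlen2 : PySem.List.len (List.take n.toNat nums) = ((n.toNat : Nat) : Int) := by
        simp [PySem.List.len, htl]
      rw [hlen2, pyRange_cast, List.foldl_map, List.foldl_map]
      apply PySem.List.foldl_congr_mem
      intro acc j hj
      have hjlt : j < n.toNat := List.mem_range.mp hj
      have hval : PySem.List.pyGetD (nums.take n.toNat) ((j : Nat) : Int) 0 = nums.getD j 0 := by
        rw [PySem.List.pyGetD_natCast, List.getD_eq_getElem?_getD, List.getD_eq_getElem?_getD,
            List.getElem?_take_of_lt hjlt]
      simp only [hval]
    rw [hAfst, hBfst, foldl_toStr_join]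
    simp
  · -- n < 0: both rows are empty
    have h0 : n.toNat = 0 := by omega
    have hA0 : PySem.List.pyRange 0 n 1 = [] := PySem.List.pyRange_one_eq_nil (by omega)
    have hemp : PySem.List.pyRange 0 n 1
        = (solZeros (List.replicate n.toNat 0)).map (fun j : Nat => (j : Int)) := by
      rw [h0, hA0]
      simp [solZeros]
    have hBfst : ((PySem.List.enumerate (PySem.List.slice nums none (some n))).foldl
        solStep (List.replicate n.toNat 0, PySem.List.pyRange 0 n 1)).1 = [] := by
      rw [hemp, solFoldB _ _ hmem, h0]
      exact foldB_nil _
    rw [hBfst, hA0, h0]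
    simp [PySem.Str.join, PySem.Chars.join_nil]
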